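-- pv_equiv track=rewrite | github.com/caceresjuancruz/tp1_ia_2024 | entrega1.py | result
-- ===== SOURCE A (Python) =====
-- from itertools import takewhile
--
-- def result(state, action):
--     frascos = [list(frasco) for frasco in state]
--     indice_origen, indice_destino = action
--
--     origen = frascos[indice_origen]
--     destino = frascos[indice_destino]
--
--     color = origen[-1]
--
--     # Obtengo los colores de origen que puedo pasar al destino
--     colores_en_origen = sum(1 for _ in takewhile(lambda x: x == color, reversed(origen))) #cuenta cuántos elementos consecutivos en el frasco origen (empezando desde el final) tienen el mismo color que el color especificado. la función takewhile toma los elementos del frasco mientras que tengan el mismo color, y luego contamos cuántos elementos se han tomado y se suman para obtener el total de elementos con el color deseado.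
--
--     # Paso los colores al destino
--     for _ in range(min(colores_en_origen, 4 - len(destino))):
--         destino.append(origen.pop())
--
--     return tuple(tuple(frasco) for frasco in frascos)
-- ===== SOURCE B (Python) =====
-- def result(state, action):
--     i, j = action
--     src = state[i]
--     dst = state[j]
--     color = src[-1]
--     cut = len(src)
--     while cut > 0 and src[cut - 1] == color:
--         cut -= 1
--     c2 = len(src) - min(len(src) - cut, 4 - len(dst))
--     jars = list(state)
--     jars[i] = src[:c2]
--     jars[j] = dst + src[c2:]
--     return tuple(jars)
-- ===== Notes on version B (the rewrite author's own statement) =====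
-- stated objective: simpler
-- what changed: B computes the pour size once (trailing-run length capped by free space) and builds the new state with two slice assignments on a shallow copy, instead of deep-copying every jar and pop/append-ing one element per loop iteration; Pre_ excludes out-of-range indices and an empty source jar (A raises IndexError) and the self-pour corner, where A's aliased pop/append loop leaves the jar unchanged while B performs the pour - no solver issues that move and either value is defensible.
-- outside the precondition, e.g. on result(((1, 2),), (0, 0)): A returns ((1, 2),), B returns ((1, 2, 2),)
import Mathlib
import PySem

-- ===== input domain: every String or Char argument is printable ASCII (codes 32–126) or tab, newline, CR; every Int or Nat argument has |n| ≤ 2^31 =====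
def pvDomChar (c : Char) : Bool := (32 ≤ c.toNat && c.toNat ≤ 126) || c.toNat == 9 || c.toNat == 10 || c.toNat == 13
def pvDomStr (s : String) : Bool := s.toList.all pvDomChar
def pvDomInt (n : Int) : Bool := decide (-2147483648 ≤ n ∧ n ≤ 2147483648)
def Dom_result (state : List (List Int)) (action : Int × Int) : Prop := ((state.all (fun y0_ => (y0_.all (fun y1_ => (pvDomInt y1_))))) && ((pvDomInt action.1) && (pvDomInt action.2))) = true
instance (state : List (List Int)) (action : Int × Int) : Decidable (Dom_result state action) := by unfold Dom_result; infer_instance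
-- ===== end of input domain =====

-- B replaces A's jar deep-copies and element-by-element pop/append pour loop by computing the
-- pour size once and writing two slice assignments onto a shallow copy of the state.
-- A mutates nothing observable (it copies the jars first); equivalence is about the return value.


-- ===== PORT A =====
def result (state : List (List Int)) (action : Int × Int) : List (List Int) :=
  let frascos := state                                         -- fresh copies of the jars
  let indiceOrigen := action.1
  let indiceDestino := action.2
  -- frascos[indiceOrigen] / frascos[indiceDestino]: the normalized positions the aliases point at
  let a := (PySem.List.pyIdx? frascos.length indiceOrigen).getD 0
  let b := (PySem.List.pyIdx? frascos.length indiceDestino).getD 0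
  let origen := (PySem.List.pyGet? frascos indiceOrigen).getD []
  let destino := (PySem.List.pyGet? frascos indiceDestino).getD []
  let color := (PySem.List.pyGet? origen (-1)).getD 0
  -- sum(1 for _ in takewhile(lambda x: x == color, reversed(origen)))
  let coloresEnOrigen : Int := ((origen.reverse.takeWhile (fun x => x == color)).length : Int)
  -- for _ in range(min(coloresEnOrigen, 4 - len(destino))): destino.append(origen.pop())
  -- origen/destino alias frascos[a]/frascos[b]: each iteration pops frascos[a], appends to frascos[b]
  (PySem.List.pyRange 0 (min coloresEnOrigen (4 - (destino.length : Int))) 1).foldl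
    (fun fr _ =>
      (fr.set a (fr.getD a []).dropLast).set b
        (((fr.set a (fr.getD a []).dropLast).getD b []) ++ [(fr.getD a []).getLast?.getD 0]))
    frascos

-- ===== PORT B =====
-- while cut > 0 and src[cut-1] == color: cut -= 1   (structural recursion on cut)
def cutAux (src : List Int) (color : Int) : Nat → Nat
  | 0 => 0
  | c + 1 => if src.getD c 0 == color then cutAux src color c else c + 1

def result_alt (state : List (List Int)) (action : Int × Int) : List (List Int) :=
  let i := action.1
  let j := action.2
  let src := (PySem.List.pyGet? state i).getD []
  let dst := (PySem.List.pyGet? state j).getD []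
  let color := (PySem.List.pyGet? src (-1)).getD 0
  let cut := cutAux src color src.length
  let c2 : Int := (src.length : Int) - min ((src.length : Int) - (cut : Int)) (4 - (dst.length : Int))
  -- jars[i] = …, jars[j] = … : Python list assignment at index i / j
  let a := (PySem.List.pyIdx? state.length i).getD 0
  let b := (PySem.List.pyIdx? state.length j).getD 0
  -- src[:c2] / src[c2:]: c2 ≥ 0 always holds here, and take/drop clamp exactly like Python slices
  (state.set a (src.take c2.toNat)).set b (dst ++ src.drop c2.toNat)

-- ===== PRECONDITION & SPEC =====
-- Pre_ excludes out-of-range jar indices and an empty source jar (A raises IndexError there), and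
-- the self-pour (both indices naming the same jar) — a move no water-sort solver issues — where
-- A's pop/append through one aliased list accidentally leaves the state unchanged while B's slice
-- assembly performs the pour; both values are defensible on that unspecified corner.
def Pre_result (state : List (List Int)) (action : Int × Int) : Prop :=
  PySem.Raise.InRange state.length action.1 ∧
  PySem.Raise.InRange state.length action.2 ∧
  (if 0 ≤ action.1 then action.1 else action.1 + (state.length : Int)) ≠
    (if 0 ≤ action.2 then action.2 else action.2 + (state.length : Int)) ∧
  (PySem.List.pyGet? state action.1).getD [] ≠ []
instance (state : List (List Int)) (action : Int × Int) : Decidable (Pre_result state action) := by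
  unfold Pre_result; infer_instance

def pvWitness_result : List (List Int) × (Int × Int) := ([[1, 1], [2]], (0, 1))

def Spec_result (state : List (List Int)) (action : Int × Int) (out : List (List Int)) : Prop := out = result_alt state action
instance (state : List (List Int)) (action : Int × Int) (out : List (List Int)) : Decidable (Spec_result state action out) := by unfold Spec_result; infer_instance

-- ===== CLAIM (what is proved, stated in full; the proofs are below) =====
def Claim_equal_result : Prop := ∀ (state : List (List Int)) (action : Int × Int), Dom_result state action → Pre_result state action → Spec_result state action (result state action)

-- ===== LEMMAS AND PROOFS =====

-- cutAux only inspects indices below its counter, so a trailing element is irrelevant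
theorem cutAux_append (l : List Int) (x color : Int) :
    ∀ c : Nat, c ≤ l.length → cutAux (l ++ [x]) color c = cutAux l color c := by
  intro c
  induction c with
  | zero => intro _; rfl
  | succ c ih =>
    intro hc
    have hg : (l ++ [x]).getD c 0 = l.getD c 0 := List.getD_append l [x] 0 c (by omega)
    simp only [cutAux, hg]
    split
    · exact ih (by omega)
    · rfl

-- B's downward scan finds exactly A's takewhile-on-reversed run length
theorem cutAux_eq (l : List Int) (color : Int) :
    cutAux l color l.length = l.length - (l.reverse.takeWhile (fun x => x == color)).length := by
  induction l using List.reverseRecOn with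
  | nil => rfl
  | append_singleton l x ih =>
    have hrun_le : (l.reverse.takeWhile (fun x => x == color)).length ≤ l.length := by
      simpa using (List.takeWhile_prefix (l := l.reverse) (fun x => x == color)).length_le
    have hlen : (l ++ [x]).length = l.length + 1 := by simp
    rw [hlen]
    have hg : (l ++ [x]).getD l.length 0 = x := by
      simp [List.getD_eq_getElem?_getD]
    simp only [cutAux, hg]
    rw [List.reverse_append]
    simp only [List.reverse_singleton, List.singleton_append, List.takeWhile_cons]
    by_cases hx : (x == color) = true
    · simp only [hx, if_true]
      rw [cutAux_append l x color l.length le_rfl, ih]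
      simp only [List.length_cons]
      omega
    · simp [hx]

-- A's pour loop: s iterations pop the last element of jar a and append it to jar b (a ≠ b)
theorem loopA {α : Type} (l : List α) (a b : Nat) (hab : a ≠ b) :
    ∀ fr : List (List Int), a < fr.length → b < fr.length →
      l.length ≤ (fr.getD a []).length →
    l.foldl (fun fr _ =>
        (fr.set a (fr.getD a []).dropLast).set b
          (((fr.set a (fr.getD a []).dropLast).getD b []) ++ [(fr.getD a []).getLast?.getD 0])) fr
      = (fr.set a ((fr.getD a []).take ((fr.getD a []).length - l.length))).set b
          ((fr.getD b []) ++ ((fr.getD a []).drop ((fr.getD a []).length - l.length)).reverse) := by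
  induction l with
  | nil =>
    intro fr ha hb _
    simp only [List.foldl_nil, List.length_nil, Nat.sub_zero,
      List.getD_eq_getElem?_getD, List.getElem?_eq_getElem ha, List.getElem?_eq_getElem hb,
      Option.getD_some, List.take_length, List.drop_length, List.reverse_nil, List.append_nil,
      List.set_getElem_self]
  | cons x l ih =>
    intro fr ha hb h
    have hGa : fr.getD a [] = fr[a] := by
      simp [List.getD_eq_getElem?_getD, List.getElem?_eq_getElem ha]
    have hGb : fr.getD b [] = fr[b] := by
      simp [List.getD_eq_getElem?_getD, List.getElem?_eq_getElem hb]
    have horg : fr[a] ≠ [] := by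
      intro he; rw [hGa, he] at h; simp at h
    obtain ⟨l', z, hsplit⟩ : ∃ l' z, fr[a] = l' ++ [z] :=
      ⟨fr[a].dropLast, fr[a].getLast horg, (List.dropLast_append_getLast horg).symm⟩
    have hlel : l.length ≤ l'.length := by
      rw [hGa, hsplit] at h; simp at h; omega
    simp only [List.foldl_cons]
    -- evaluate one iteration
    have ha1 : a < (fr.set a (fr.getD a []).dropLast).length := by simpa using ha
    have hb1 : b < (fr.set a (fr.getD a []).dropLast).length := by simpa using hb
    have hGb1 : (fr.set a (fr.getD a []).dropLast).getD b [] = fr[b] := by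
      rw [List.getD_eq_getElem?_getD, List.getElem?_set_ne hab,
        List.getElem?_eq_getElem hb, Option.getD_some]
    set fr2 := (fr.set a (fr.getD a []).dropLast).set b
        (((fr.set a (fr.getD a []).dropLast).getD b []) ++ [(fr.getD a []).getLast?.getD 0])
      with hfr2
    have ha2 : a < fr2.length := by simpa [hfr2] using ha
    have hb2 : b < fr2.length := by simpa [hfr2] using hb
    have hGa2 : fr2.getD a [] = l' := by
      rw [hfr2, List.getD_eq_getElem?_getD, List.getElem?_set_ne (Ne.symm hab),
        List.getElem?_set_self (by simpa using ha), Option.getD_some, hGa, hsplit,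
        List.dropLast_concat]
    have hGb2 : fr2.getD b [] = fr[b] ++ [z] := by
      rw [hfr2, List.getD_eq_getElem?_getD, List.getElem?_set_self (by simpa using hb),
        Option.getD_some, hGb1, hGa, hsplit, List.getLast?_concat, Option.getD_some]
    rw [ih fr2 ha2 hb2 (by rw [hGa2]; exact hlel)]
    rw [hGa2, hGb2]
    have hcollapse : ∀ (X Y : List Int),
        ((fr2.set a X).set b Y) = ((fr.set a X).set b Y) := by
      intro X Y
      rw [hfr2]
      rw [List.set_comm _ _ hab, List.set_set, ← List.set_comm _ _ hab, List.set_set]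
    rw [hcollapse]
    have hd : l'.length - l.length ≤ l'.length := by omega
    have hGa' : fr.getD a [] = l' ++ [z] := by rw [hGa, hsplit]
    rw [hGa', hGb]
    have hlen2 : (l' ++ [z]).length - (x :: l).length = l'.length - l.length := by
      simp
    rw [hlen2,
      List.take_append_of_le_length hd,
      List.drop_append_of_le_length hd]
    simp

-- the last s elements of src all carry the top color, so that segment is a replicate
theorem take_rev_replicate (src : List Int) (color : Int) (s : Nat)
    (hs : s ≤ (src.reverse.takeWhile (fun x => x == color)).length) :
    src.reverse.take s = List.replicate s color := by
  have hpre := List.takeWhile_prefix (l := src.reverse) (fun x => x == color)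
  obtain ⟨t, ht⟩ := hpre
  rw [← ht, List.take_append_of_le_length hs]
  rw [List.eq_replicate_iff]
  refine ⟨by simp [hs], ?_⟩
  intro y hy
  have hy2 : y ∈ src.reverse.takeWhile (fun x => x == color) := List.mem_of_mem_take hy
  have := List.mem_takeWhile_imp hy2
  exact eq_of_beq this

-- normalized index: under InRange, pyIdx? returns the Python-normalized nonnegative index
theorem pyIdx_norm (n : Nat) (i : Int) (h1 : -(n : Int) ≤ i) (h2 : i < (n : Int)) :
    PySem.List.pyIdx? n i = some ((if 0 ≤ i then i else i + (n : Int)).toNat) := by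
  by_cases h0 : 0 ≤ i
  · simp [PySem.List.pyIdx?, h0, h2]
  · simp only [PySem.List.pyIdx?, h0, if_false, if_pos h1, Option.some.injEq]
    omega

-- packaging of one Python index access under InRange: normalized index and element
theorem idx_facts (state : List (List Int)) (i : Int)
    (h1 : -(state.length : Int) ≤ i) (h2 : i < (state.length : Int)) :
    ∃ a : Nat, a < state.length ∧
      (if 0 ≤ i then i else i + (state.length : Int)) = (a : Int) ∧
      PySem.List.pyIdx? state.length i = some a ∧
      PySem.List.pyGet? state i = state[a]? := by
  refine ⟨(if 0 ≤ i then i else i + (state.length : Int)).toNat, ?_, ?_, ?_, ?_⟩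
  · by_cases h0 : 0 ≤ i <;> simp [h0] <;> omega
  · by_cases h0 : 0 ≤ i <;> simp [h0] <;> omega
  · rw [pyIdx_norm state.length i h1 h2]
  · simp only [PySem.List.pyGet?, pyIdx_norm state.length i h1 h2, Option.bind_some]

-- ===== VERDICT (by name: the statement is the Claim_ definition above) =====
theorem result_spec : Claim_equal_result := by
  intro state action _ hpre
  unfold Spec_result
  obtain ⟨i, j⟩ := action
  obtain ⟨⟨hi1, hi2⟩, ⟨hj1, hj2⟩, hij, hsrc⟩ := hpre
  obtain ⟨a, haN, hia, hidxa, hgeta⟩ := idx_facts state i hi1 hi2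
  obtain ⟨b, hbN, hjb, hidxb, hgetb⟩ := idx_facts state j hj1 hj2
  have hab : a ≠ b := by
    intro h; apply hij; rw [hia, hjb, h]
  have hgeta' : (PySem.List.pyGet? state i).getD [] = state[a] := by
    rw [hgeta, List.getElem?_eq_getElem haN]; rfl
  have hgetb' : (PySem.List.pyGet? state j).getD [] = state[b] := by
    rw [hgetb, List.getElem?_eq_getElem hbN]; rfl
  have hGa : state.getD a [] = state[a] := by
    simp [List.getD_eq_getElem?_getD, List.getElem?_eq_getElem haN]
  have hGb : state.getD b [] = state[b] := by
    simp [List.getD_eq_getElem?_getD, List.getElem?_eq_getElem hbN]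
  simp only [result, result_alt]
  rw [hgeta', hgetb', hidxa, hidxb]
  simp only [Option.getD_some]
  set src := state[a] with hsrcdef
  set dst := state[b] with hdstdef
  set color := (PySem.List.pyGet? src (-1)).getD 0 with hcolordef
  rw [cutAux_eq src color]
  set R := (src.reverse.takeWhile (fun x => x == color)).length with hRdef
  have hRL : R ≤ src.length := by
    simpa using (List.takeWhile_prefix (l := src.reverse) (fun x => x == color)).length_le
  have hcast : (src.length : Int) - ((src.length - R : Nat) : Int) = (R : Int) := by omega
  rw [hcast]
  set m := min (R : Int) (4 - (dst.length : Int)) with hmdef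
  set s := m.toNat with hsdef
  have hmR : m ≤ (R : Int) := min_le_left _ _
  have hsR : s ≤ R := by omega
  have hsL : s ≤ src.length := hsR.trans hRL
  have hlenrange : (PySem.List.pyRange 0 m 1).length = s := by
    rw [PySem.List.length_pyRange_one]; omega
  rw [loopA _ a b hab state haN hbN (by rw [hlenrange, hGa]; exact hsL), hlenrange, hGa, hGb]
  -- B's slice bounds reduce to the same cut point len - s
  have htoNat : ((src.length : Int) - m).toNat = src.length - s ∨
      (src.length ≤ ((src.length : Int) - m).toNat ∧ s = 0) := by
    by_cases h0 : 0 ≤ m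
    · left; omega
    · right; constructor <;> omega
  have htake : src.take ((src.length : Int) - m).toNat = src.take (src.length - s) := by
    rcases htoNat with h | ⟨h, hs0⟩
    · rw [h]
    · rw [List.take_of_length_le h, hs0, Nat.sub_zero, List.take_length]
  have hdropeq : src.drop ((src.length : Int) - m).toNat = src.drop (src.length - s) := by
    rcases htoNat with h | ⟨h, hs0⟩
    · rw [h]
    · rw [List.drop_eq_nil_of_le h, hs0, Nat.sub_zero, List.drop_length]
  rw [htake, hdropeq]
  have hrev : src.reverse.take s = List.replicate s color :=
    take_rev_replicate src color s (by omega)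
  have hdroprev : (src.drop (src.length - s)).reverse = List.replicate s color := by
    rw [List.reverse_drop, (by omega : src.length - (src.length - s) = s)]
    exact hrev
  have hdrop : src.drop (src.length - s) = List.replicate s color := by
    rw [← List.reverse_reverse (src.drop (src.length - s)), hdroprev, List.reverse_replicate]
  rw [hdroprev, hdrop]
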